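-- pv_equiv track=rewrite | github.com/jhchoi316/Python_Algorithm | Programmers/04. 완전탐색/Lv1-모의고사.py | solution
-- ===== SOURCE A (Python) =====
-- def solution(answers):
--     supo1 = [1,2,3,4,5] * len(answers)
--     supo2 = [2,1,2,3,2,4,2,5] * len(answers)
--     supo3 = [3,3,1,1,2,2,4,4,5,5] * len(answers)
--     answer = []
--     tmp = []
--
--     cnt = 0
--     for i in range(len(answers)):
--         if answers[i] == supo1[i]:
--             cnt += 1
--     tmp.append(cnt)
--     cnt = 0
--     for i in range(len(answers)):
--         if answers[i] == supo2[i]: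
--             cnt += 1
--     tmp.append(cnt)
--     cnt = 0
--     for i in range(len(answers)):
--         if answers[i] == supo3[i]:
--             cnt += 1
--     tmp.append(cnt)
--
--     for i in range(len(tmp)):
--         if max(tmp) == tmp[i]:
--             answer.append(i+1)
--
--     return answer
-- ===== SOURCE B (Python) =====
-- def solution(answers):
--     # Histogram pass: patterns all repeat with period 40 (= lcm(5, 8, 10)), so the
--     # count for each pattern is determined by the table freq[(i % 40, value)].
--     freq = {}
--     for i, a in enumerate(answers):
--         key = (i % 40, a)
--         freq[key] = freq.get(key, 0) + 1
--     patterns = [[1, 2, 3, 4, 5], [2, 1, 2, 3, 2, 4, 2, 5], [3, 3, 1, 1, 2, 2, 4, 4, 5, 5]]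
--     counts = [sum(freq.get((r, p[r % len(p)]), 0) for r in range(40)) for p in patterns]
--     m = max(counts)
--     return [j + 1 for j, c in enumerate(counts) if c == m]
-- ===== Notes on version B (the rewrite author's own statement) =====
-- stated objective: alternative
-- what changed: B builds a frequency dictionary keyed by (i % 40, answer) in one pass (40 = lcm of the pattern lengths), then evaluates each pattern's score as 40 table lookups, instead of A's three sequential scans comparing against materialized repeated pattern lists; per-element pattern comparisons disappear.
import Mathlib
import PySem

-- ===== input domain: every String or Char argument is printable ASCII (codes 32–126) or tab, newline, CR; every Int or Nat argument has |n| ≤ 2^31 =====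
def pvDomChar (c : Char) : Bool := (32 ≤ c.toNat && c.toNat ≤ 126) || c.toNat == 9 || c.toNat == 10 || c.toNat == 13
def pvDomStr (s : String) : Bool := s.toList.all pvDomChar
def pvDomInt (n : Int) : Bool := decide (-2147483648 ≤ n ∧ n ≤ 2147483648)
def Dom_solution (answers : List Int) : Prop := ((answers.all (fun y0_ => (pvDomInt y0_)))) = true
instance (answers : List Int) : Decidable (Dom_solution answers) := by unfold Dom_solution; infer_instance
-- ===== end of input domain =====

-- B replaces A's three scans over materialized repeated pattern lists by a histogram keyed by
-- (i % 40, value) (40 = lcm of the pattern lengths) built in one pass, from which each pattern's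
-- score is read off with 40 lookups; same return value.

-- ===== PORT A =====
def solution (answers : List Int) : List Int :=
  let supo1 := (List.replicate answers.length ([1,2,3,4,5] : List Int)).flatten
  let supo2 := (List.replicate answers.length ([2,1,2,3,2,4,2,5] : List Int)).flatten
  let supo3 := (List.replicate answers.length ([3,3,1,1,2,2,4,4,5,5] : List Int)).flatten
  let c1 : Int := (PySem.List.pyRange 0 (answers.length : Int) 1).foldl
    (fun cnt i => if PySem.List.pyGetD answers i 0 = PySem.List.pyGetD supo1 i 0 then cnt + 1 else cnt) 0
  let c2 : Int := (PySem.List.pyRange 0 (answers.length : Int) 1).foldl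
    (fun cnt i => if PySem.List.pyGetD answers i 0 = PySem.List.pyGetD supo2 i 0 then cnt + 1 else cnt) 0
  let c3 : Int := (PySem.List.pyRange 0 (answers.length : Int) 1).foldl
    (fun cnt i => if PySem.List.pyGetD answers i 0 = PySem.List.pyGetD supo3 i 0 then cnt + 1 else cnt) 0
  let tmp : List Int := [c1, c2, c3]
  (PySem.List.pyRange 0 (tmp.length : Int) 1).foldl
    (fun answer i =>
      if (PySem.List.max? tmp (fun y => y)).getD 0 = PySem.List.pyGetD tmp i 0 then answer ++ [i + 1]
      else answer) []

-- ===== PORT B =====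
def solution_alt (answers : List Int) : List Int :=
  let freq := (PySem.List.enumerate answers 0).foldl
    (fun (d : PySem.Dict (Int × Int) Int) ia =>
      d.insert (PySem.Int.mod ia.1 40, ia.2) (d.getD (PySem.Int.mod ia.1 40, ia.2) 0 + 1))
    PySem.Dict.empty
  let patterns : List (List Int) := [[1,2,3,4,5], [2,1,2,3,2,4,2,5], [3,3,1,1,2,2,4,4,5,5]]
  let counts : List Int := patterns.map (fun p =>
    ((PySem.List.pyRange 0 40 1).map (fun r =>
      freq.getD (r, PySem.List.pyGetD p (PySem.Int.mod r (p.length : Int)) 0) 0)).sum)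
  let m : Int := (PySem.List.max? counts (fun y => y)).getD 0
  ((PySem.List.enumerate counts 0).filter (fun jc => jc.2 = m)).map (fun jc => jc.1 + 1)

-- ===== PRECONDITION & SPEC =====
def Spec_solution (answers : List Int) (out : List Int) : Prop := out = solution_alt answers
instance (answers : List Int) (out : List Int) : Decidable (Spec_solution answers out) := by unfold Spec_solution; infer_instance

-- ===== CLAIM (what is proved, stated in full; the proofs are below) =====
def Claim_equal_solution : Prop := ∀ (answers : List Int), Dom_solution answers → Spec_solution answers (solution answers)

-- ===== LEMMAS AND PROOFS =====

-- canonical count of pattern matches, to which both ports' counters are reduced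
def cntCanon (answers p : List Int) : Nat :=
  (PySem.List.pyRange 0 (answers.length : Int) 1).countP
    (fun i => decide (PySem.List.pyGetD answers i 0
      = PySem.List.pyGetD p (PySem.Int.mod i (p.length : Int)) 0))

-- the histogram keys B inserts, as a plain list
def keysOf (answers : List Int) : List (Int × Int) :=
  (PySem.List.enumerate answers 0).map (fun ia => (PySem.Int.mod ia.1 40, ia.2))

lemma getD_flatten_replicate (base : List Int) (n k : Nat) (h : k < n * base.length) :
    ((List.replicate n base).flatten).getD k 0 = base.getD (k % base.length) 0 := by
  induction n generalizing k with
  | zero => omega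
  | succ n ih =>
    rw [List.replicate_succ, List.flatten_cons]
    have hs : (n + 1) * base.length = n * base.length + base.length := by ring
    by_cases hk : k < base.length
    · rw [List.getD_append _ _ _ _ hk, Nat.mod_eq_of_lt hk]
    · rw [Nat.not_lt] at hk
      rw [List.getD_append_right _ _ _ _ hk, ih (k - base.length) (by omega),
        Nat.mod_eq_sub_mod hk]

lemma mod_cast_const (k m : Nat) : PySem.Int.mod (k : Int) (m : Int) = ((k % m : Nat) : Int) :=
  PySem.Int.mod_natCast k m

-- A's count loop equals the canonical count
lemma countA_eq (answers base : List Int) (hb : base ≠ []) :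
    (PySem.List.pyRange 0 (answers.length : Int) 1).foldl
      (fun cnt i => if PySem.List.pyGetD answers i 0 =
          PySem.List.pyGetD ((List.replicate answers.length base).flatten) i 0 then cnt + 1 else cnt)
      (0 : Int)
    = (cntCanon answers base : Int) := by
  have h := PySem.List.foldl_count_if
    (fun i => decide (PySem.List.pyGetD answers i 0 =
      PySem.List.pyGetD ((List.replicate answers.length base).flatten) i 0))
    (PySem.List.pyRange 0 (answers.length : Int) 1) 0
  simp only [decide_eq_true_eq] at h
  rw [h, zero_add, cntCanon]
  congr 1
  apply List.countP_congr
  intro i hi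
  rw [PySem.List.mem_pyRange_one] at hi
  obtain ⟨h0, hn⟩ := hi
  obtain ⟨k, rfl⟩ := Int.eq_ofNat_of_zero_le h0
  have hk : k < answers.length := by exact_mod_cast hn
  have hb' : 0 < base.length := List.length_pos_iff.mpr hb
  simp only [mod_cast_const, PySem.List.pyGetD_natCast]
  rw [getD_flatten_replicate base answers.length k (by nlinarith)]

-- B's histogram lookup is a plain count over the key list
lemma freq_getD (answers : List Int) (w : Int × Int) :
    ((PySem.List.enumerate answers 0).foldl
      (fun (d : PySem.Dict (Int × Int) Int) ia =>
        d.insert (PySem.Int.mod ia.1 40, ia.2) (d.getD (PySem.Int.mod ia.1 40, ia.2) 0 + 1))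
      PySem.Dict.empty).getD w 0 = ((keysOf answers).count w : Int) := by
  have h : ((PySem.List.enumerate answers 0).foldl
      (fun (d : PySem.Dict (Int × Int) Int) ia =>
        d.insert (PySem.Int.mod ia.1 40, ia.2) (d.getD (PySem.Int.mod ia.1 40, ia.2) 0 + 1))
      PySem.Dict.empty)
      = (keysOf answers).foldl (fun d x => d.insert x (d.getD x 0 + 1)) PySem.Dict.empty := by
    rw [keysOf, List.foldl_map]
  rw [h, PySem.Dict.getD_foldl_insert_add_one]
  simp [PySem.Dict.getD_empty]

-- summand is zero off the key's residue
lemma one_hot_zero (v : Int → Int) (q : Int × Int) (l : List Int) (h : q.1 ∉ l) :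
    (l.map (fun r => if q = (r, v r) then (1 : Int) else 0)).sum = 0 := by
  induction l with
  | nil => rfl
  | cons r t ih =>
    have hr : q ≠ (r, v r) := by
      intro he; exact h (by simp [he])
    simp only [List.map_cons, List.sum_cons, if_neg hr]
    rw [ih (fun hm => h (List.mem_cons_of_mem _ hm)), add_zero]

lemma one_hot (v : Int → Int) (q : Int × Int) (l : List Int) (hnd : l.Nodup) (h : q.1 ∈ l) :
    (l.map (fun r => if q = (r, v r) then (1 : Int) else 0)).sum
      = if q.2 = v q.1 then 1 else 0 := by
  induction l with
  | nil => simp at h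
  | cons r t ih =>
    rcases List.nodup_cons.mp hnd with ⟨hr, hnd'⟩
    simp only [List.map_cons, List.sum_cons]
    by_cases he : q.1 = r
    · subst he
      rw [one_hot_zero v q t hr, add_zero]
      by_cases hv : q.2 = v q.1
      · simp [Prod.ext_iff, hv]
      · simp [Prod.ext_iff, hv]
    · rw [if_neg (fun hc => he (congrArg Prod.fst hc)), zero_add]
      exact ih hnd' ((List.mem_cons.mp h).resolve_left he)

-- sum over the 40 residues of per-key counts = one countP over the keys
lemma sum_count (v : Int → Int) (ks : List (Int × Int))
    (h : ∀ q ∈ ks, q.1 ∈ PySem.List.pyRange 0 40 1) :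
    ((PySem.List.pyRange 0 40 1).map (fun r => ((ks.count (r, v r) : Nat) : Int))).sum
      = ((ks.countP (fun q => decide (q.2 = v q.1)) : Nat) : Int) := by
  induction ks with
  | nil =>
    simp only [List.count_nil, List.countP_nil, Nat.cast_zero]
    rw [PySem.List.sum_map_const_int, mul_zero]
  | cons q t ih =>
    have hmap : (PySem.List.pyRange 0 40 1).map
        (fun r => (((q :: t).count (r, v r) : Nat) : Int))
        = (PySem.List.pyRange 0 40 1).map
          (fun r => ((t.count (r, v r) : Nat) : Int) + (if q = (r, v r) then (1 : Int) else 0)) := by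
      apply List.map_congr_left
      intro r _
      rw [List.count_cons]
      push_cast
      congr 1
      by_cases hq : q = (r, v r)
      · rw [if_pos hq, if_pos (by simp [hq])]
      · rw [if_neg hq, if_neg (by simp [hq])]
    rw [hmap, PySem.List.sum_map_add_int,
      ih (fun q hq => h q (List.mem_cons_of_mem _ hq)),
      one_hot v q _ (PySem.List.nodup_pyRange_one 0 40) (h q List.mem_cons_self),
      List.countP_cons]
    by_cases hv : q.2 = v q.1
    · simp [hv]
    · simp [hv]

-- B's per-pattern sum equals the canonical count
lemma countB_eq (answers p : List Int) (hdvd : p.length ∣ 40) :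
    ((PySem.List.pyRange 0 40 1).map (fun r =>
      (((keysOf answers).count (r, PySem.List.pyGetD p (PySem.Int.mod r (p.length : Int)) 0) : Nat) : Int))).sum
      = (cntCanon answers p : Int) := by
  have hmem : ∀ q ∈ keysOf answers, q.1 ∈ PySem.List.pyRange 0 40 1 := by
    intro q hq
    rw [keysOf] at hq
    obtain ⟨ia, _, rfl⟩ := List.mem_map.mp hq
    rw [PySem.List.mem_pyRange_one]
    exact ⟨PySem.Int.mod_nonneg ia.1 (by norm_num), PySem.Int.mod_lt ia.1 (by norm_num)⟩
  rw [sum_count (fun r => PySem.List.pyGetD p (PySem.Int.mod r (p.length : Int)) 0) _ hmem,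
    keysOf, List.countP_map, PySem.List.enumerate_eq_map_pyRange answers 0, List.countP_map,
    PySem.List.len_eq, cntCanon]
  congr 1
  apply List.countP_congr
  intro i hi
  rw [PySem.List.mem_pyRange_one] at hi
  obtain ⟨h0, _⟩ := hi
  obtain ⟨k, rfl⟩ := Int.eq_ofNat_of_zero_le h0
  have h1 : PySem.Int.mod (PySem.Int.mod ((k : Nat) : Int) 40) (p.length : Int)
      = PySem.Int.mod ((k : Nat) : Int) (p.length : Int) := by
    rw [show ((40 : Int)) = ((40 : Nat) : Int) from rfl, mod_cast_const, mod_cast_const,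
      mod_cast_const, Nat.mod_mod_of_dvd k hdvd]
  simp only [Function.comp_apply]
  rw [h1]

-- the final collection step, both shapes, for an arbitrary reference value M
lemma collect_eq (M c1 c2 c3 : Int) :
    (PySem.List.pyRange 0 (([c1, c2, c3] : List Int).length : Int) 1).foldl
      (fun answer i =>
        if M = PySem.List.pyGetD ([c1, c2, c3] : List Int) i 0 then answer ++ [i + 1]
        else answer) []
    = ((PySem.List.enumerate ([c1, c2, c3] : List Int) 0).filter
        (fun jc => jc.2 = M)).map (fun jc => jc.1 + 1) := by
  have hr : PySem.List.pyRange 0 (([c1, c2, c3] : List Int).length : Int) 1 = [0, 1, 2] := by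
    norm_num
    decide
  have g0 : PySem.List.pyGetD ([c1, c2, c3] : List Int) 0 0 = c1 := rfl
  have g1 : PySem.List.pyGetD ([c1, c2, c3] : List Int) 1 0 = c2 := rfl
  have g2 : PySem.List.pyGetD ([c1, c2, c3] : List Int) 2 0 = c3 := rfl
  rw [hr]
  simp only [List.foldl_cons, List.foldl_nil, g0, g1, g2,
    PySem.List.enumerate_cons, PySem.List.enumerate_nil]
  rw [show (fun jc : Int × Int => decide (jc.2 = M)) = (fun jc : Int × Int => decide (M = jc.2)) by
    funext jc; simp [eq_comm]]
  by_cases h1 : M = c1 <;> by_cases h2 : M = c2 <;> by_cases h3 : M = c3 <;>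
    simp_all [List.filter, List.map]

-- ===== VERDICT (by name: the statement is the Claim_ definition above) =====
theorem solution_spec : Claim_equal_solution := by
  intro answers _
  simp only [Spec_solution, solution, solution_alt]
  simp only [freq_getD, List.map_cons, List.map_nil]
  rw [countA_eq answers [1,2,3,4,5] (by simp),
    countA_eq answers [2,1,2,3,2,4,2,5] (by simp),
    countA_eq answers [3,3,1,1,2,2,4,4,5,5] (by simp),
    countB_eq answers [1,2,3,4,5] (by norm_num),
    countB_eq answers [2,1,2,3,2,4,2,5] (by norm_num),
    countB_eq answers [3,3,1,1,2,2,4,4,5,5] (by norm_num)]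
  exact collect_eq _ _ _ _
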